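-- pv_equiv track=rewrite | github.com/nixxholas/IS111-rekt | LabTest/LT2 Trial - v3/TrialLabTest2ResourceFiles/hwchen.2020/q2.py | reverse_segments
-- ===== SOURCE A (Python) =====
-- def reverse_segments(text):
--     segments = []
--
--     cur_text = ''
--     for c in text:
--         if c not in '|-=':
--             cur_text += c
--         else:
--             segments.append(cur_text[::-1])
--             segments.append(c)
--             cur_text = ''
--
--     if cur_text != '':
--         segments.append(cur_text[::-1])
--
--     return segments
-- ===== SOURCE B (Python) =====
-- def reverse_segments(text):
--     out = []
--     i, n = 0, len(text)
--     while i < n: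
--         j = i
--         while j < n and text[j] not in '|-=':
--             j += 1
--         out.append(text[i:j][::-1])
--         if j < n:
--             out.append(text[j])
--         i = j + 1
--     return out
-- ===== Notes on version B (the rewrite author's own statement) =====
-- stated objective: alternative
-- what changed: Replaces A's char-by-char accumulator with explicit flush/trailing logic by a two-pointer scan that jumps to the next delimiter and appends reversed slices directly, needing no trailing-segment fixup.
import Mathlib
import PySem

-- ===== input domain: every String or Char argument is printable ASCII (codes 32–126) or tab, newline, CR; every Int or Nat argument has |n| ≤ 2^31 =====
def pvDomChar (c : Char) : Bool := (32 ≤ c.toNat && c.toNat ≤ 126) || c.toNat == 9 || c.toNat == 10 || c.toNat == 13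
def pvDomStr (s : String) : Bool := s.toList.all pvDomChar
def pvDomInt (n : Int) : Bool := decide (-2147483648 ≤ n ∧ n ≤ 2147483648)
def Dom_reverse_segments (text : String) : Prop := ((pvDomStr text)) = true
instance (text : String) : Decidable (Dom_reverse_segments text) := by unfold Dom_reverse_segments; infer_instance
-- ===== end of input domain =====

-- B replaces A's accumulator-and-flush loop by a two-pointer scan appending reversed slices (alternative, same cost).

-- ===== PORT A =====
-- A: accumulate cur_text char by char, flush (reversed) plus the delimiter on each delimiter, flush the tail if nonempty.
def reverse_segments (text : String) : List String :=
  let st := text.toList.foldl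
    (fun (st : List String × List Char) c =>
      if ¬ (c ∈ ['|', '-', '=']) then (st.1, st.2 ++ [c])
      else (st.1 ++ [String.mk st.2.reverse, String.mk [c]], []))
    ([], [])
  if st.2 ≠ [] then st.1 ++ [String.mk st.2.reverse] else st.1

-- ===== PORT B =====
def pvNotDelim (c : Char) : Bool := !(c == '|' || c == '-' || c == '=')

-- B's outer while loop: the inner `while j < n and text[j] not in '|-='` is takeWhile/dropWhile,
-- `text[i:j][::-1]` is the reversed slice, `i = j + 1` is the recursive call on the rest.
def reverse_segments_altGo (cs : List Char) : List String :=
  if cs = [] then []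
  else
    let seg := cs.takeWhile pvNotDelim
    match h : cs.dropWhile pvNotDelim with
    | [] => [String.mk seg.reverse]
    | d :: rest => String.mk seg.reverse :: String.mk [d] :: reverse_segments_altGo rest
termination_by cs.length
decreasing_by
  have hle := List.length_dropWhile_le pvNotDelim cs
  rw [h] at hle
  simp at hle
  omega

def reverse_segments_alt (text : String) : List String :=
  reverse_segments_altGo text.toList

-- ===== PRECONDITION & SPEC =====
def Spec_reverse_segments (text : String) (out : List String) : Prop := out = reverse_segments_alt text
instance (text : String) (out : List String) : Decidable (Spec_reverse_segments text out) := by unfold Spec_reverse_segments; infer_instance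

-- ===== CLAIM (what is proved, stated in full; the proofs are below) =====
def Claim_equal_reverse_segments : Prop := ∀ (text : String), Dom_reverse_segments text → Spec_reverse_segments text (reverse_segments text)

-- ===== LEMMAS AND PROOFS =====

-- A's loop body and finishing step, named for the proofs.
def stepA (st : List String × List Char) (c : Char) : List String × List Char :=
  if ¬ (c ∈ ['|', '-', '=']) then (st.1, st.2 ++ [c])
  else (st.1 ++ [String.mk st.2.reverse, String.mk [c]], [])

def finishA (st : List String × List Char) : List String :=
  if st.2 ≠ [] then st.1 ++ [String.mk st.2.reverse] else st.1

-- A's loop, rephrased recursively with the pending segment `cur` as parameter.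
def gA : List Char → List Char → List String
  | cur, [] => if cur ≠ [] then [String.mk cur.reverse] else []
  | cur, c :: cs =>
    if ¬ (c ∈ ['|', '-', '=']) then gA (cur ++ [c]) cs
    else String.mk cur.reverse :: String.mk [c] :: gA [] cs

-- B's scan with a pending prefix `cur` prepended to the first segment.
def gB (cur : List Char) (cs : List Char) : List String :=
  match cs with
  | [] => if cur = [] then [] else [String.mk cur.reverse]
  | c :: cs' =>
    match List.dropWhile pvNotDelim (c :: cs') with
    | [] => [String.mk (cur ++ List.takeWhile pvNotDelim (c :: cs')).reverse]
    | d :: rest =>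
      String.mk (cur ++ List.takeWhile pvNotDelim (c :: cs')).reverse ::
        String.mk [d] :: reverse_segments_altGo rest

theorem notDelim_iff (c : Char) : pvNotDelim c = true ↔ ¬ (c ∈ ['|', '-', '=']) := by
  simp only [pvNotDelim, List.mem_cons, List.not_mem_nil, or_false,
    Bool.not_eq_eq_eq_not, Bool.not_true, Bool.or_eq_false_iff, beq_eq_false_iff_ne, ne_eq]
  tauto

theorem altGo_eq_gB (cs : List Char) : reverse_segments_altGo cs = gB [] cs := by
  cases cs with
  | nil => simp [reverse_segments_altGo, gB]
  | cons c cs' =>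
    rw [reverse_segments_altGo, if_neg (by simp)]
    simp only [gB, List.nil_append]
    split
    · rename_i heq
      rw [heq]
    · rename_i d rest heq
      rw [heq]

theorem foldA (cs : List Char) : ∀ (segs : List String) (cur : List Char),
    finishA (cs.foldl stepA (segs, cur)) = segs ++ gA cur cs := by
  induction cs with
  | nil =>
    intro segs cur
    simp only [List.foldl, gA, finishA]
    by_cases h : cur = [] <;> simp [h]
  | cons c cs ih =>
    intro segs cur
    simp only [List.foldl]
    by_cases h : c ∈ ['|', '-', '=']
    · rw [show stepA (segs, cur) c = (segs ++ [String.mk cur.reverse, String.mk [c]], []) from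
        by simp [stepA, h]]
      rw [ih, gA, if_neg (by simp [h])]
      simp
    · rw [show stepA (segs, cur) c = (segs, cur ++ [c]) from by simp [stepA, h]]
      rw [ih, gA, if_pos (by simp [h])]

theorem gB_cons_notDelim (cur : List Char) (c : Char) (cs : List Char)
    (h : pvNotDelim c = true) : gB cur (c :: cs) = gB (cur ++ [c]) cs := by
  cases cs with
  | nil => simp [gB, List.takeWhile_cons, List.dropWhile_cons, h]
  | cons c' cs' =>
    cases hd : List.dropWhile pvNotDelim (c' :: cs') with
    | nil => simp [gB, List.takeWhile_cons, List.dropWhile_cons, h, hd, List.append_assoc]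
    | cons d rest => simp [gB, List.takeWhile_cons, List.dropWhile_cons, h, hd, List.append_assoc]

theorem gA_eq_gB (cs : List Char) : ∀ (cur : List Char), gA cur cs = gB cur cs := by
  induction cs with
  | nil =>
    intro cur
    simp only [gA, gB]
    by_cases h : cur = [] <;> simp [h]
  | cons c cs ih =>
    intro cur
    by_cases h : c ∈ ['|', '-', '=']
    · have hd : pvNotDelim c = false := by
        rw [← Bool.not_eq_true, notDelim_iff]; exact fun hn => hn h
      rw [gA, if_neg (by simp [h]), ih [], ← altGo_eq_gB]
      simp [gB, List.dropWhile_cons, hd]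
    · have hd : pvNotDelim c = true := (notDelim_iff c).mpr h
      rw [gA, if_pos (by simp [h]), ih (cur ++ [c]), gB_cons_notDelim cur c cs hd]

-- ===== VERDICT (by name: the statement is the Claim_ definition above) =====
theorem reverse_segments_spec : Claim_equal_reverse_segments := by
  intro text _
  show reverse_segments text = reverse_segments_alt text
  have hA : reverse_segments text = finishA (text.toList.foldl stepA ([], [])) := rfl
  rw [hA, foldA, gA_eq_gB, ← altGo_eq_gB]
  rfl
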